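-- pv_equiv track=rewrite | github.com/paqui4ever/Algoritmos-y-Estructuras-de-Datos-I | Parciales Python/Parcial2.py | frecuencia_posiciones_por_caballo2
-- ===== SOURCE A (Python) =====
-- def frecuencia_posiciones_por_caballo2 (caballos: list[str], carreras: dict[str, list[str]]) -> dict[str, list[int]]:
--     res: dict[str, list[int]] = {}
--     for i in range (len(caballos)): # Itero sobre la lista de caballos
--         if caballos[i] not in res: # Verifico que ese caballo no esté en res
--            lista_ceros = [0]*len(caballos) # Inicializo la lista de ceros de igual longitud que la lista de caballos
--            for keys, values in carreras.items():
--                for caballo in range (len(values)): # Veo los caballos con posiciones en la lista de values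
--                    if values[caballo] == caballos[i]: # Si encuentro al caballo[i] en x posicion agrego un 1 en la lista de 0s en esa posicion y agrego ese valor al res
--                        lista_ceros[caballo] += 1
--                        res[caballos[i]] = lista_ceros
--     return res
-- ===== SOURCE B (Python) =====
-- def frecuencia_posiciones_por_caballo2(caballos: list[str], carreras: dict[str, list[str]]) -> dict[str, list[int]]:
--     horses = set(caballos)
--     counts: dict[str, list[int]] = {}
--     for valores in carreras.values():
--         for j, h in enumerate(valores):
--             if h in horses:
--                 base = counts.get(h)
--                 if base is None:
--                     base = [0] * len(caballos)
--                 base[j] += 1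
--                 counts[h] = base
--     return {h: counts[h] for h in caballos if h in counts}
-- ===== Notes on version B (the rewrite author's own statement) =====
-- stated objective: faster
-- what changed: Instead of re-scanning every race once per horse (for each horse, walk all races looking for it), B makes a single pass over all race position lists, building a horse->count-vector dict index on the fly with a set for membership, and then emits the indexed horses in caballos order.
import Mathlib
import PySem

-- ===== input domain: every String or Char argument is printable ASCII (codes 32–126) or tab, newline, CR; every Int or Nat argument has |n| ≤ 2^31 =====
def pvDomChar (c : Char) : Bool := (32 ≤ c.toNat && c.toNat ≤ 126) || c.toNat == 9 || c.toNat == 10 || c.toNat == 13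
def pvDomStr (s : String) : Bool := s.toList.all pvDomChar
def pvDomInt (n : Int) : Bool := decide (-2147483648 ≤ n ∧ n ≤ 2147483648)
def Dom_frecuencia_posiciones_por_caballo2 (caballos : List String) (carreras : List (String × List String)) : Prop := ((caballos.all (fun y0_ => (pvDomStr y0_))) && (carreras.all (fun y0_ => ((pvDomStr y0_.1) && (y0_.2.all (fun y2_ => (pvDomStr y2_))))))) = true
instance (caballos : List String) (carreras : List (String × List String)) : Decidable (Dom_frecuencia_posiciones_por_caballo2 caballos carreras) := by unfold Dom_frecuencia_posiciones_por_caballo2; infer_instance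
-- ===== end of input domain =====

-- B replaces A's per-horse re-scan of every race (O(H·N)) by one pass over all race positions
-- building a dict index, then emits the result in caballos order (objective: faster).

-- ===== PORT A =====
-- In A, `lista_ceros` is mutated in place and `res[caballos[i]]` aliases it; since every
-- `lista_ceros[caballo] += 1` is immediately followed by `res[caballos[i]] = lista_ceros`,
-- updating the pair (lista_ceros, res) together is exact for the returned value.
-- `lista_ceros[caballo] += 1` is ported as List.set, exact when caballo < len(caballos) —
-- guaranteed inside Pre_; outside Pre_ Python raises IndexError.
def frecuencia_posiciones_por_caballo2 (caballos : List String) (carreras : List (String × List String)) : List (String × List Int) :=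
  ((List.range caballos.length).foldl (fun (res : PySem.Dict String (List Int)) i =>
      let c := caballos.getD i ""
      if res.contains c then res
      else
        (carreras.foldl
            (fun (st : List Int × PySem.Dict String (List Int)) kv =>
              (List.range kv.2.length).foldl
                (fun (st : List Int × PySem.Dict String (List Int)) j =>
                  if kv.2.getD j "" = c then
                    let lc := st.1.set j (st.1.getD j 0 + 1)
                    (lc, st.2.insert c lc)
                  else st) st)
            (List.replicate caballos.length (0 : Int), res)).2)
    PySem.Dict.empty).items

-- ===== PORT B =====
-- `base[j] += 1` is ported as List.set, exact when j < len(caballos) (inside Pre_; outside,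
-- Python raises IndexError); enumerate indices are ≥ 0, so `.toNat` is exact.
def frecuencia_posiciones_por_caballo2_alt (caballos : List String) (carreras : List (String × List String)) : List (String × List Int) :=
  let horses : PySem.Set String := PySem.Set.ofList caballos
  let counts := carreras.foldl
    (fun (counts : PySem.Dict String (List Int)) kv =>
      (PySem.List.enumerate kv.2 0).foldl
        (fun (counts : PySem.Dict String (List Int)) p =>
          if PySem.Set.contains horses p.2 then
            let base := counts.getD p.2 (List.replicate caballos.length (0 : Int))
            counts.insert p.2 (base.set p.1.toNat (base.getD p.1.toNat 0 + 1))
          else counts) counts)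
    PySem.Dict.empty
  (caballos.foldl
    (fun (out : PySem.Dict String (List Int)) h =>
      if counts.contains h then out.insert h (counts.getD h []) else out)
    PySem.Dict.empty).items

-- ===== PRECONDITION & SPEC =====
-- Pre_ excludes exactly the inputs on which Python A raises IndexError: some listed caballo
-- occurring in a race at a position index ≥ len(caballos) (B raises the same IndexError there).
def Pre_frecuencia_posiciones_por_caballo2 (caballos : List String) (carreras : List (String × List String)) : Prop :=
  ∀ kv ∈ carreras, ∀ p ∈ PySem.List.enumerate kv.2 0, p.2 ∈ caballos → p.1 < (caballos.length : Int)
instance (caballos : List String) (carreras : List (String × List String)) : Decidable (Pre_frecuencia_posiciones_por_caballo2 caballos carreras) := by unfold Pre_frecuencia_posiciones_por_caballo2; infer_instance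

def pvWitness_frecuencia_posiciones_por_caballo2 : List String × (List (String × List String)) :=
  (["a", "b"], [("r1", ["b", "a"]), ("r2", ["a", "c"])])

def Spec_frecuencia_posiciones_por_caballo2 (caballos : List String) (carreras : List (String × List String)) (out : List (String × List Int)) : Prop := out = frecuencia_posiciones_por_caballo2_alt caballos carreras
instance (caballos : List String) (carreras : List (String × List String)) (out : List (String × List Int)) : Decidable (Spec_frecuencia_posiciones_por_caballo2 caballos carreras out) := by unfold Spec_frecuencia_posiciones_por_caballo2; infer_instance

-- ===== CLAIM (what is proved, stated in full; the proofs are below) =====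
def Claim_equal_frecuencia_posiciones_por_caballo2 : Prop := ∀ (caballos : List String) (carreras : List (String × List String)), Dom_frecuencia_posiciones_por_caballo2 caballos carreras → Pre_frecuencia_posiciones_por_caballo2 caballos carreras → Spec_frecuencia_posiciones_por_caballo2 caballos carreras (frecuencia_posiciones_por_caballo2 caballos carreras)

-- ===== LEMMAS AND PROOFS =====

-- the stream of (position index, horse) events of all races, in A's and B's common scan order
def pvEvs (carreras : List (String × List String)) : List (Int × String) :=
  carreras.flatMap (fun kv => PySem.List.enumerate kv.2 0)

-- the count vector of horse c after processing the events evs, starting from v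
def pvBump (c : String) (evs : List (Int × String)) (v : List Int) : List Int :=
  evs.foldl (fun v p => if p.2 = c then v.set p.1.toNat (v.getD p.1.toNat 0 + 1) else v) v

-- does horse c occur in the event stream?
def pvOcc (c : String) (evs : List (Int × String)) : Bool := evs.any (fun p => p.2 = c)

theorem pvBump_of_not_occ (c : String) (evs : List (Int × String)) (v : List Int)
    (h : pvOcc c evs = false) : pvBump c evs v = v := by
  induction evs generalizing v with
  | nil => rfl
  | cons e t ih =>
      simp only [pvOcc, List.any_cons, Bool.or_eq_false_iff, decide_eq_false_iff_not] at h
      simp only [pvBump, List.foldl_cons, if_neg h.1]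
      exact ih v (by simp [pvOcc, h.2])

theorem pv_map_range_getD (xs : List String) :
    (List.range xs.length).map (fun i => xs.getD i "") = xs := by
  apply List.ext_getElem
  · simp
  · intro i h1 h2
    simp [List.getElem?_eq_getElem h2]

theorem pv_foldl_range_getD {σ : Type} (xs : List String) (F : σ → String → σ) (init : σ) :
    (List.range xs.length).foldl (fun s i => F s (xs.getD i "")) init = xs.foldl F init := by
  rw [← List.foldl_map, pv_map_range_getD]

theorem pv_map_range_enum (vs : List String) :
    (List.range vs.length).map (fun (j : Nat) => ((j : Int), vs.getD j ""))
      = PySem.List.enumerate vs 0 := by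
  apply List.ext_getElem
  · simp [PySem.List.length_enumerate]
  · intro i h1 h2
    have hv : i < vs.length := by simpa [PySem.List.length_enumerate] using h2
    simp [PySem.List.getElem_enumerate, List.getElem?_eq_getElem hv]

-- A's inner index loop over one race equals the fold over its enumeration
theorem pv_arange_enum (c : String) (vs : List String)
    (st : List Int × PySem.Dict String (List Int)) :
    (List.range vs.length).foldl
        (fun (st : List Int × PySem.Dict String (List Int)) j =>
          if vs.getD j "" = c then
            let lc := st.1.set j (st.1.getD j 0 + 1)
            (lc, st.2.insert c lc)
          else st) st
      = (PySem.List.enumerate vs 0).foldl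
          (fun (st : List Int × PySem.Dict String (List Int)) p =>
            if p.2 = c then
              let lc := st.1.set p.1.toNat (st.1.getD p.1.toNat 0 + 1)
              (lc, st.2.insert c lc)
            else st) st := by
  conv_rhs => rw [← pv_map_range_enum, List.foldl_map]
  rfl

-- A's inner two loops for one horse c, over the flattened event stream
theorem pv_afold (c : String) (evs : List (Int × String)) (lc : List Int)
    (res : PySem.Dict String (List Int)) :
    evs.foldl
        (fun (st : List Int × PySem.Dict String (List Int)) p =>
          if p.2 = c then
            let lc := st.1.set p.1.toNat (st.1.getD p.1.toNat 0 + 1)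
            (lc, st.2.insert c lc)
          else st) (lc, res)
      = (pvBump c evs lc,
          if pvOcc c evs then res.insert c (pvBump c evs lc) else res) := by
  induction evs generalizing lc res with
  | nil => simp [pvBump, pvOcc]
  | cons e t ih =>
      by_cases he : e.2 = c
      · simp only [List.foldl_cons, if_pos he]
        rw [ih]
        have hocc : pvOcc c (e :: t) = true := by simp [pvOcc, he]
        have hb : pvBump c (e :: t) lc
            = pvBump c t (lc.set e.1.toNat (lc.getD e.1.toNat 0 + 1)) := by
          simp [pvBump, he]
        rw [hocc, hb]
        cases ht : pvOcc c t
        · rw [pvBump_of_not_occ c t (lc.set e.1.toNat (lc.getD e.1.toNat 0 + 1)) ht]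
          simp
        · simp [PySem.Dict.insert_insert_self]
      · simp only [List.foldl_cons, if_neg he]
        rw [ih]
        have hocc : pvOcc c (e :: t) = pvOcc c t := by simp [pvOcc, he]
        have hb : pvBump c (e :: t) lc = pvBump c t lc := by simp [pvBump, he]
        rw [hocc, hb]

-- A's whole inner computation for one fresh horse c
theorem pv_ainner (c : String) (carreras : List (String × List String)) (n : Nat)
    (res : PySem.Dict String (List Int)) :
    (carreras.foldl
        (fun (st : List Int × PySem.Dict String (List Int)) kv =>
          (List.range kv.2.length).foldl
            (fun (st : List Int × PySem.Dict String (List Int)) j =>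
              if kv.2.getD j "" = c then
                let lc := st.1.set j (st.1.getD j 0 + 1)
                (lc, st.2.insert c lc)
              else st) st)
        (List.replicate n (0 : Int), res)).2
      = if pvOcc c (pvEvs carreras) then
          res.insert c (pvBump c (pvEvs carreras) (List.replicate n (0 : Int)))
        else res := by
  have h2 : (fun (st : List Int × PySem.Dict String (List Int)) (kv : String × List String) =>
        (List.range kv.2.length).foldl
          (fun (st : List Int × PySem.Dict String (List Int)) j =>
            if kv.2.getD j "" = c then
              let lc := st.1.set j (st.1.getD j 0 + 1)
              (lc, st.2.insert c lc)
            else st) st)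
      = (fun st kv => (PySem.List.enumerate kv.2 0).foldl
          (fun (st : List Int × PySem.Dict String (List Int)) p =>
            if p.2 = c then
              let lc := st.1.set p.1.toNat (st.1.getD p.1.toNat 0 + 1)
              (lc, st.2.insert c lc)
            else st) st) := by
    funext st kv
    exact pv_arange_enum c kv.2 st
  rw [h2]
  have h3 : carreras.foldl
        (fun st kv => (PySem.List.enumerate kv.2 0).foldl
          (fun (st : List Int × PySem.Dict String (List Int)) p =>
            if p.2 = c then
              let lc := st.1.set p.1.toNat (st.1.getD p.1.toNat 0 + 1)
              (lc, st.2.insert c lc)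
            else st) st)
        (List.replicate n (0 : Int), res)
      = (pvEvs carreras).foldl
          (fun (st : List Int × PySem.Dict String (List Int)) p =>
            if p.2 = c then
              let lc := st.1.set p.1.toNat (st.1.getD p.1.toNat 0 + 1)
              (lc, st.2.insert c lc)
            else st) (List.replicate n (0 : Int), res) :=
    (List.foldl_flatMap).symm
  rw [h3, pv_afold]

-- B's counts dict, characterised by lookup
theorem pv_bfold_get? (horses : PySem.Set String) (n : Nat) (evs : List (Int × String))
    (counts : PySem.Dict String (List Int)) (c : String) :
    (evs.foldl
        (fun (counts : PySem.Dict String (List Int)) p =>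
          if PySem.Set.contains horses p.2 then
            let base := counts.getD p.2 (List.replicate n (0 : Int))
            counts.insert p.2 (base.set p.1.toNat (base.getD p.1.toNat 0 + 1))
          else counts) counts).get? c
      = if PySem.Set.contains horses c then
          (match counts.get? c with
            | some v => some (pvBump c evs v)
            | none => if pvOcc c evs then some (pvBump c evs (List.replicate n (0 : Int))) else none)
        else counts.get? c := by
  induction evs generalizing counts with
  | nil =>
      cases hoh : PySem.Set.contains horses c
      · simp
      · cases hg : counts.get? c <;> simp [hg, pvBump, pvOcc]
  | cons e t ih =>
      by_cases heh : PySem.Set.contains horses e.2 = true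
      · simp only [List.foldl_cons, if_pos heh]
        rw [ih]
        by_cases hce : c = e.2
        · subst hce
          simp only [if_pos heh, PySem.Dict.get?_insert_self]
          cases hg : counts.get? e.2 with
          | some v =>
              have hbase := PySem.Dict.getD_of_get?_eq_some counts (List.replicate n (0 : Int)) hg
              have hb : pvBump e.2 (e :: t) v
                  = pvBump e.2 t (v.set e.1.toNat (v.getD e.1.toNat 0 + 1)) := by simp [pvBump]
              simp [hbase, hb]
          | none =>
              have hbase := PySem.Dict.getD_of_get?_eq_none counts (List.replicate n (0 : Int)) hg
              have hocc : pvOcc e.2 (e :: t) = true := by simp [pvOcc]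
              have hb : pvBump e.2 (e :: t) (List.replicate n (0 : Int))
                  = pvBump e.2 t ((List.replicate n (0 : Int)).set e.1.toNat
                      ((List.replicate n (0 : Int)).getD e.1.toNat 0 + 1)) := by simp [pvBump]
              simp [hbase, hocc, hb]
        · have hne' : e.2 ≠ c := fun h => hce h.symm
          rw [PySem.Dict.get?_insert_of_ne _ _ hce]
          have hb : ∀ v, pvBump c (e :: t) v = pvBump c t v := by
            intro v; simp [pvBump, hne']
          have hocc : pvOcc c (e :: t) = pvOcc c t := by simp [pvOcc, hne']
          simp [hb, hocc]
      · simp only [List.foldl_cons, if_neg heh]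
        rw [ih]
        by_cases hch : c ∈ horses
        · have hne' : e.2 ≠ c := fun hq => heh (by simp [PySem.Set.contains, hq ▸ hch])
          have hb : ∀ v, pvBump c (e :: t) v = pvBump c t v := by
            intro v; simp [pvBump, hne']
          have hocc : pvOcc c (e :: t) = pvOcc c t := by simp [pvOcc, hne']
          simp [hb, hocc]
        · simp [PySem.Set.contains, hch]

theorem pv_insert_self (d : PySem.Dict String (List Int)) (c : String) (v : List Int)
    (hnd : d.keys.Nodup) (h : d.get? c = some v) : d.insert c v = d := by
  apply PySem.Dict.ext
  have hcont : d.contains c = true := by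
    rw [PySem.Dict.contains_eq_isSome_get?, h]; rfl
  rw [PySem.Dict.items_insert_of_contains d v hcont]
  have hid : ∀ p ∈ d.items, (if p.1 == c then ((c, v) : String × List Int) else p) = p := by
    intro p hp
    by_cases hpc : p.1 = c
    · have hmem : (p.1, p.2) ∈ d.items := by simpa using hp
      have hg : d.get? p.1 = some p.2 := PySem.Dict.get?_of_mem_items d hmem hnd
      subst hpc
      rw [h] at hg
      injection hg with hg'
      simp [hg']
    · simp [hpc]
  calc d.items.map (fun p => if p.1 == c then ((c, v) : String × List Int) else p)
      = d.items.map id := List.map_congr_left hid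
    _ = d.items := List.map_id _

-- the two final per-caballo folds agree
theorem pv_last (l : List String) (occ : String → Bool) (vec : String → List Int)
    (counts : PySem.Dict String (List Int))
    (hc : ∀ c ∈ l, counts.get? c = if occ c then some (vec c) else none)
    (s : PySem.Dict String (List Int)) (hnd : s.keys.Nodup)
    (hs : ∀ c v, s.get? c = some v → occ c = true ∧ v = vec c) :
    l.foldl (fun res c => if res.contains c then res
               else if occ c then res.insert c (vec c) else res) s
      = l.foldl (fun out h => if counts.contains h then out.insert h (counts.getD h []) else out) s := by
  induction l generalizing s with
  | nil => rfl
  | cons c rest ih =>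
      simp only [List.foldl_cons]
      have hcc : counts.contains c = occ c := by
        rw [PySem.Dict.contains_eq_isSome_get?, hc c (by simp)]
        cases occ c <;> simp
      have hgd : occ c = true → counts.getD c [] = vec c := by
        intro ho
        rw [PySem.Dict.getD_eq_get?_getD, hc c (by simp), if_pos ho]
        rfl
      have hc' : ∀ x ∈ rest, counts.get? x = if occ x then some (vec x) else none :=
        fun x hx => hc x (by simp [hx])
      by_cases hsc : s.contains c = true
      · obtain ⟨v, hv⟩ : ∃ v, s.get? c = some v := by
          rw [PySem.Dict.contains_eq_isSome_get?] at hsc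
          exact Option.isSome_iff_exists.mp hsc
        obtain ⟨ho, hveq⟩ := hs c v hv
        rw [if_pos hsc, hcc, ho, if_pos rfl, hgd ho,
          pv_insert_self s c (vec c) hnd (hveq ▸ hv)]
        exact ih hc' s hnd hs
      · rw [if_neg hsc, hcc]
        cases ho : occ c
        · rw [if_neg Bool.false_ne_true, if_neg Bool.false_ne_true]
          exact ih hc' s hnd hs
        · rw [if_pos rfl, if_pos rfl, hgd ho]
          refine ih hc' _ (PySem.Dict.nodup_keys_insert s c (vec c) hnd) ?_
          intro x v hx
          rw [PySem.Dict.get?_insert] at hx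
          by_cases hxc : x = c
          · subst hxc
            rw [if_pos rfl] at hx
            injection hx with hx'
            exact ⟨ho, hx'.symm⟩
          · rw [if_neg hxc] at hx
            exact hs x v hx

theorem pv_main (caballos : List String) (carreras : List (String × List String)) :
    frecuencia_posiciones_por_caballo2 caballos carreras
      = frecuencia_posiciones_por_caballo2_alt caballos carreras := by
  have hA : frecuencia_posiciones_por_caballo2 caballos carreras
      = (caballos.foldl
          (fun (res : PySem.Dict String (List Int)) c =>
            if res.contains c then res
            else
              (carreras.foldl
                (fun (st : List Int × PySem.Dict String (List Int)) kv =>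
                  (List.range kv.2.length).foldl
                    (fun (st : List Int × PySem.Dict String (List Int)) j =>
                      if kv.2.getD j "" = c then
                        let lc := st.1.set j (st.1.getD j 0 + 1)
                        (lc, st.2.insert c lc)
                      else st) st)
                (List.replicate caballos.length (0 : Int), res)).2)
          PySem.Dict.empty).items :=
    congrArg PySem.Dict.items (pv_foldl_range_getD caballos
      (fun (res : PySem.Dict String (List Int)) c =>
        if res.contains c then res
        else
          (carreras.foldl
            (fun (st : List Int × PySem.Dict String (List Int)) kv =>
              (List.range kv.2.length).foldl
                (fun (st : List Int × PySem.Dict String (List Int)) j =>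
                  if kv.2.getD j "" = c then
                    let lc := st.1.set j (st.1.getD j 0 + 1)
                    (lc, st.2.insert c lc)
                  else st) st)
            (List.replicate caballos.length (0 : Int), res)).2)
      PySem.Dict.empty)
  rw [hA]
  have hF : (fun (res : PySem.Dict String (List Int)) c =>
        if res.contains c then res
        else
          (carreras.foldl
            (fun (st : List Int × PySem.Dict String (List Int)) kv =>
              (List.range kv.2.length).foldl
                (fun (st : List Int × PySem.Dict String (List Int)) j =>
                  if kv.2.getD j "" = c then
                    let lc := st.1.set j (st.1.getD j 0 + 1)
                    (lc, st.2.insert c lc)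
                  else st) st)
            (List.replicate caballos.length (0 : Int), res)).2)
      = (fun (res : PySem.Dict String (List Int)) c =>
          if res.contains c then res
          else if pvOcc c (pvEvs carreras) then
            res.insert c (pvBump c (pvEvs carreras) (List.replicate caballos.length (0 : Int)))
          else res) := by
    funext res c
    by_cases h : res.contains c = true
    · rw [if_pos h, if_pos h]
    · rw [if_neg h, if_neg h]
      exact pv_ainner c carreras caballos.length res
  rw [hF]
  -- the B side
  have hC : (carreras.foldl
        (fun (counts : PySem.Dict String (List Int)) kv =>
          (PySem.List.enumerate kv.2 0).foldl
            (fun (counts : PySem.Dict String (List Int)) p =>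
              if PySem.Set.contains (PySem.Set.ofList caballos) p.2 then
                let base := counts.getD p.2 (List.replicate caballos.length (0 : Int))
                counts.insert p.2 (base.set p.1.toNat (base.getD p.1.toNat 0 + 1))
              else counts) counts)
        PySem.Dict.empty)
      = (pvEvs carreras).foldl
          (fun (counts : PySem.Dict String (List Int)) p =>
            if PySem.Set.contains (PySem.Set.ofList caballos) p.2 then
              let base := counts.getD p.2 (List.replicate caballos.length (0 : Int))
              counts.insert p.2 (base.set p.1.toNat (base.getD p.1.toNat 0 + 1))
            else counts) PySem.Dict.empty :=
    (List.foldl_flatMap).symm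
  have hB : frecuencia_posiciones_por_caballo2_alt caballos carreras
      = (caballos.foldl
          (fun (out : PySem.Dict String (List Int)) h =>
            if ((pvEvs carreras).foldl
                (fun (counts : PySem.Dict String (List Int)) p =>
                  if PySem.Set.contains (PySem.Set.ofList caballos) p.2 then
                    let base := counts.getD p.2 (List.replicate caballos.length (0 : Int))
                    counts.insert p.2 (base.set p.1.toNat (base.getD p.1.toNat 0 + 1))
                  else counts) PySem.Dict.empty).contains h then
              out.insert h
                (((pvEvs carreras).foldl
                  (fun (counts : PySem.Dict String (List Int)) p =>
                    if PySem.Set.contains (PySem.Set.ofList caballos) p.2 then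
                      let base := counts.getD p.2 (List.replicate caballos.length (0 : Int))
                      counts.insert p.2 (base.set p.1.toNat (base.getD p.1.toNat 0 + 1))
                    else counts) PySem.Dict.empty).getD h [])
            else out)
          PySem.Dict.empty).items := by
    show (caballos.foldl
        (fun (out : PySem.Dict String (List Int)) h =>
          if (carreras.foldl
              (fun (counts : PySem.Dict String (List Int)) kv =>
                (PySem.List.enumerate kv.2 0).foldl
                  (fun (counts : PySem.Dict String (List Int)) p =>
                    if PySem.Set.contains (PySem.Set.ofList caballos) p.2 then
                      let base := counts.getD p.2 (List.replicate caballos.length (0 : Int))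
                      counts.insert p.2 (base.set p.1.toNat (base.getD p.1.toNat 0 + 1))
                    else counts) counts)
              PySem.Dict.empty).contains h then
            out.insert h
              ((carreras.foldl
                (fun (counts : PySem.Dict String (List Int)) kv =>
                  (PySem.List.enumerate kv.2 0).foldl
                    (fun (counts : PySem.Dict String (List Int)) p =>
                      if PySem.Set.contains (PySem.Set.ofList caballos) p.2 then
                        let base := counts.getD p.2 (List.replicate caballos.length (0 : Int))
                        counts.insert p.2 (base.set p.1.toNat (base.getD p.1.toNat 0 + 1))
                      else counts) counts)
                PySem.Dict.empty).getD h [])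
          else out)
        PySem.Dict.empty).items = _
    rw [hC]
  rw [hB]
  refine congrArg PySem.Dict.items
    (pv_last caballos (fun c => pvOcc c (pvEvs carreras))
      (fun c => pvBump c (pvEvs carreras) (List.replicate caballos.length (0 : Int)))
      _ ?_ PySem.Dict.empty PySem.Dict.nodup_keys_empty ?_)
  · intro c hmem
    rw [pv_bfold_get? (PySem.Set.ofList caballos) caballos.length (pvEvs carreras)
        PySem.Dict.empty c]
    rw [PySem.Dict.get?_empty]
    have hcont : PySem.Set.contains (PySem.Set.ofList caballos) c = true := by
      simp [PySem.Set.contains, (PySem.Set.mem_ofList caballos c).mpr hmem]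
    rw [if_pos hcont]
  · intro x v hx
    rw [PySem.Dict.get?_empty] at hx
    cases hx

-- ===== VERDICT (by name: the statement is the Claim_ definition above) =====
theorem frecuencia_posiciones_por_caballo2_spec : Claim_equal_frecuencia_posiciones_por_caballo2 := by
  intro caballos carreras _ _
  exact pv_main caballos carreras
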